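-- pv_equiv track=rewrite | github.com/Elkorm98/SuperMultimodalVerificatInator | signature_modules.py | stroke_dur
-- ===== SOURCE A (Python) =====
-- def stroke_dur(points):
--   strokes_durs=[]
--   start=0
--   for i in range(1,len(points)):
--     if(points[i][3]>0 and points[i-1][3]==0):
--       start=points[i][4]
--     if(points[i][3]==0 and points[i-1][3]>0):
--       strokes_durs.append(points[i][4]-start)
--   return strokes_durs
-- ===== SOURCE B (Python) =====
-- def stroke_dur(points):
--     # Collect-then-pair: first pass extracts the pen-down (rise) and pen-up (fall)
--     # edges from adjacent pressure comparisons; second pass pairs each fall with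
--     # the most recent preceding rise (start defaults to 0, like A's initial state).
--     rises = []  # (index, time) of pen-down edges
--     falls = []  # (index, time) of pen-up edges
--     for i, (prev, cur) in enumerate(zip(points, points[1:]), 1):
--         if cur[3] > 0 and prev[3] == 0:
--             rises.append((i, cur[4]))
--         elif cur[3] == 0 and prev[3] > 0:
--             falls.append((i, cur[4]))
--     pending = rises[::-1]  # reversed so pop() yields the earliest remaining rise in O(1)
--     durs = []
--     start = 0
--     for fi, ft in falls:
--         while pending and pending[-1][0] < fi:
--             start = pending.pop()[1]
--         durs.append(ft - start)
--     return durs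
-- ===== Notes on version B (the rewrite author's own statement) =====
-- stated objective: alternative
-- what changed: Replaces A's interleaved one-pass state machine with a collect-then-pair decomposition: one pass extracts the rise/fall edge lists from adjacent pressure pairs, a second pass pairs each fall with the most recent preceding rise (start defaulting to 0).
import Mathlib
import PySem

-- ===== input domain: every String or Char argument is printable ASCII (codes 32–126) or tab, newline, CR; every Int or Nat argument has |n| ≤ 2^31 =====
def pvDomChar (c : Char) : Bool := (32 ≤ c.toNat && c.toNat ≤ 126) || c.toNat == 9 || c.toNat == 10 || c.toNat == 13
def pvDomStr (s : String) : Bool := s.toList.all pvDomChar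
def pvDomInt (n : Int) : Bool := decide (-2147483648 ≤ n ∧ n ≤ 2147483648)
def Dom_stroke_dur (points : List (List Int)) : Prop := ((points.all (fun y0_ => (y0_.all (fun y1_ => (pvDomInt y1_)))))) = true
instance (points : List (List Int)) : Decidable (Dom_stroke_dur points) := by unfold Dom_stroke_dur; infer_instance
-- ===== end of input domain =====

-- B replaces A's interleaved state machine with a collect-then-pair decomposition
-- (edge lists first, then pair each fall with the latest preceding rise); same cost.

-- ===== PORT A =====
def stroke_dur (points : List (List Int)) : List Int :=
  ((PySem.List.pyRange 1 (points.length : Int) 1).foldl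
      (fun (st : List Int × Int) i =>
        let st :=
          if 0 < PySem.List.pyGetD (PySem.List.pyGetD points i []) 3 0 ∧
             PySem.List.pyGetD (PySem.List.pyGetD points (i - 1) []) 3 0 = 0 then
            (st.1, PySem.List.pyGetD (PySem.List.pyGetD points i []) 4 0)
          else st
        if PySem.List.pyGetD (PySem.List.pyGetD points i []) 3 0 = 0 ∧
           0 < PySem.List.pyGetD (PySem.List.pyGetD points (i - 1) []) 3 0 then
          (st.1 ++ [PySem.List.pyGetD (PySem.List.pyGetD points i []) 4 0 - st.2], st.2)
        else st)
      ([], 0)).1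

-- ===== PORT B =====
-- Source B keeps the pending rises REVERSED so that list.pop() removes the earliest
-- remaining rise in O(1); the port consumes the same sequence from the front of
-- the unreversed list (pending[-1] / pop()  =  head / tail here).
def strokeConsume : List (Int × Int) → Int → Int → List (Int × Int) × Int
  | [], start, _ => ([], start)
  | r :: rest, start, fi =>
    if r.1 < fi then strokeConsume rest r.2 fi else (r :: rest, start)

def stroke_dur_alt (points : List (List Int)) : List Int :=
  let rf := (PySem.List.enumerate (points.zip (PySem.List.slice points (some 1) none)) 1).foldl
      (fun (st : List (Int × Int) × List (Int × Int)) e =>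
        if 0 < PySem.List.pyGetD e.2.2 3 0 ∧ PySem.List.pyGetD e.2.1 3 0 = 0 then
          (st.1 ++ [(e.1, PySem.List.pyGetD e.2.2 4 0)], st.2)
        else if PySem.List.pyGetD e.2.2 3 0 = 0 ∧ 0 < PySem.List.pyGetD e.2.1 3 0 then
          (st.1, st.2 ++ [(e.1, PySem.List.pyGetD e.2.2 4 0)])
        else st)
      ([], [])
  let fin := rf.2.foldl
      (fun (st : List (Int × Int) × Int × List Int) f =>
        let c := strokeConsume st.1 st.2.1 f.1
        (c.1, c.2, st.2.2 ++ [f.2 - c.2]))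
      (rf.1, 0, [])
  fin.2.2

-- ===== PRECONDITION & SPEC =====
-- Exactly where Python A returns: every row read as points[i] (i ≥ 1) needs column 3;
-- its predecessor's column 3 is read only when points[i][3] ≥ 0 (short-circuit `and`);
-- column 4 of points[i] is read only on a stroke edge.
def Pre_stroke_dur (points : List (List Int)) : Prop :=
  ∀ pc ∈ points.zip (points.drop 1),
    4 ≤ pc.2.length ∧
    (0 ≤ pc.2.getD 3 0 → 4 ≤ pc.1.length) ∧
    (((0 < pc.2.getD 3 0 ∧ pc.1.getD 3 0 = 0) ∨ (pc.2.getD 3 0 = 0 ∧ 0 < pc.1.getD 3 0)) →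
      5 ≤ pc.2.length)
instance (points : List (List Int)) : Decidable (Pre_stroke_dur points) := by
  unfold Pre_stroke_dur; infer_instance

def pvWitness_stroke_dur : List (List Int) := [[0, 0, 0, 1, 5], [0, 0, 0, 0, 9]]

def Spec_stroke_dur (points : List (List Int)) (out : List Int) : Prop := out = stroke_dur_alt points
instance (points : List (List Int)) (out : List Int) : Decidable (Spec_stroke_dur points out) := by
  unfold Spec_stroke_dur; infer_instance

-- ===== CLAIM (what is proved, stated in full; the proofs are below) =====
def Claim_equal_stroke_dur : Prop := ∀ (points : List (List Int)), Dom_stroke_dur points → Pre_stroke_dur points → Spec_stroke_dur points (stroke_dur points)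

-- ===== LEMMAS AND PROOFS =====
-- (the two ports are in fact equal on ALL inputs: pyGetD supplies the same defaults
--  to both ports; Pre_ is only needed because the Python A raises outside it)

def strokeStepA (st : List Int × Int) (prev cur : List Int) : List Int × Int :=
  let st :=
    if 0 < PySem.List.pyGetD cur 3 0 ∧ PySem.List.pyGetD prev 3 0 = 0 then
      (st.1, PySem.List.pyGetD cur 4 0)
    else st
  if PySem.List.pyGetD cur 3 0 = 0 ∧ 0 < PySem.List.pyGetD prev 3 0 then
    (st.1 ++ [PySem.List.pyGetD cur 4 0 - st.2], st.2)
  else st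

def machRec : List (List Int × List Int) → List Int → Int → List Int
  | [], durs, _ => durs
  | pc :: l, durs, start =>
    if 0 < PySem.List.pyGetD pc.2 3 0 ∧ PySem.List.pyGetD pc.1 3 0 = 0 then
      machRec l durs (PySem.List.pyGetD pc.2 4 0)
    else if PySem.List.pyGetD pc.2 3 0 = 0 ∧ 0 < PySem.List.pyGetD pc.1 3 0 then
      machRec l (durs ++ [PySem.List.pyGetD pc.2 4 0 - start]) start
    else machRec l durs start

def risesOf : List (Int × (List Int × List Int)) → List (Int × Int)
  | [] => []
  | e :: l =>
    if 0 < PySem.List.pyGetD e.2.2 3 0 ∧ PySem.List.pyGetD e.2.1 3 0 = 0 then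
      (e.1, PySem.List.pyGetD e.2.2 4 0) :: risesOf l
    else risesOf l

def fallsOf : List (Int × (List Int × List Int)) → List (Int × Int)
  | [] => []
  | e :: l =>
    if 0 < PySem.List.pyGetD e.2.2 3 0 ∧ PySem.List.pyGetD e.2.1 3 0 = 0 then fallsOf l
    else if PySem.List.pyGetD e.2.2 3 0 = 0 ∧ 0 < PySem.List.pyGetD e.2.1 3 0 then
      (e.1, PySem.List.pyGetD e.2.2 4 0) :: fallsOf l
    else fallsOf l

def pairRec : List (Int × Int) → Int → List (Int × Int) → List Int → List Int
  | _, _, [], durs => durs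
  | rs, start, f :: fs, durs =>
    pairRec (strokeConsume rs start f.1).1 (strokeConsume rs start f.1).2 fs
      (durs ++ [f.2 - (strokeConsume rs start f.1).2])

theorem pyGetD_cons_succ' {α : Type} (x : α) (l : List α) (j : Int) (d : α) (h : 0 ≤ j) :
    PySem.List.pyGetD (x :: l) (j + 1) d = PySem.List.pyGetD l j d := by
  obtain ⟨n, rfl⟩ := Int.eq_ofNat_of_zero_le h
  simp [PySem.List.pyGetD]

theorem adj_aux {σ : Type} (f : σ → List Int → List Int → σ) :
    ∀ (t : List (List Int)) (prev : List Int) (init : σ),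
    (PySem.List.pyRange 0 (t.length : Int) 1).foldl
      (fun acc j => f acc (PySem.List.pyGetD (prev :: t) j []) (PySem.List.pyGetD t j [])) init
    = ((prev :: t).zip t).foldl (fun acc pc => f acc pc.1 pc.2) init := by
  intro t
  induction t with
  | nil => intro prev init; simp [PySem.List.pyRange_one_eq_nil]
  | cons c t' ih =>
    intro prev init
    rw [PySem.List.pyRange_one_cons (by simp [List.length_cons])]
    simp only [List.foldl_cons, PySem.List.pyGetD_zero_cons, List.zip_cons_cons]
    rw [show ((0:Int) + 1) = 1 by ring]
    rw [← ih c (f init prev c)]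
    rw [PySem.List.pyRange_one 1, PySem.List.pyRange_one 0]
    have hlen : ((((c :: t').length : Int)) - 1).toNat = t'.length := by
      simp [List.length_cons]
    have hlen2 : (((t'.length : Int)) - 0).toNat = t'.length := by simp
    rw [hlen, hlen2, List.foldl_map, List.foldl_map]
    apply PySem.List.foldl_congr_mem
    intro acc k hk
    rw [show ((1:Int) + (k:Int)) = (k:Int) + 1 by ring,
        pyGetD_cons_succ' _ _ _ _ (by positivity),
        pyGetD_cons_succ' _ _ _ _ (by positivity)]
    rw [show ((0:Int) + (k:Int)) = (k:Int) by ring]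

theorem foldl_pyRange_shift {σ : Type} (m : Nat) (g : σ → Int → σ) (init : σ) :
    (PySem.List.pyRange 1 ((m : Int) + 1) 1).foldl g init
    = (PySem.List.pyRange 0 (m : Int) 1).foldl (fun acc j => g acc (j + 1)) init := by
  rw [PySem.List.pyRange_one 1, PySem.List.pyRange_one 0]
  have h1 : (((m : Int) + 1) - 1).toNat = m := by simp
  have h2 : (((m : Int)) - 0).toNat = m := by simp
  rw [h1, h2, List.foldl_map, List.foldl_map]
  apply PySem.List.foldl_congr_mem
  intro acc k _
  congr 1
  ring

-- A's port equals the pair-list fold of strokeStepA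
theorem A_eq_pairs (points : List (List Int)) :
    stroke_dur points
      = ((points.zip points.tail).foldl (fun st pc => strokeStepA st pc.1 pc.2) ([], 0)).1 := by
  cases points with
  | nil => rfl
  | cons prev t =>
    unfold stroke_dur
    congr 1
    have hstep :
        (PySem.List.pyRange 1 ((prev :: t).length : Int) 1).foldl
          (fun (st : List Int × Int) i =>
            let st :=
              if 0 < PySem.List.pyGetD (PySem.List.pyGetD (prev :: t) i []) 3 0 ∧
                 PySem.List.pyGetD (PySem.List.pyGetD (prev :: t) (i - 1) []) 3 0 = 0 then
                (st.1, PySem.List.pyGetD (PySem.List.pyGetD (prev :: t) i []) 4 0)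
              else st
            if PySem.List.pyGetD (PySem.List.pyGetD (prev :: t) i []) 3 0 = 0 ∧
               0 < PySem.List.pyGetD (PySem.List.pyGetD (prev :: t) (i - 1) []) 3 0 then
              (st.1 ++ [PySem.List.pyGetD (PySem.List.pyGetD (prev :: t) i []) 4 0 - st.2], st.2)
            else st)
          ([], 0)
        = (PySem.List.pyRange 0 (t.length : Int) 1).foldl
            (fun (st : List Int × Int) j =>
              strokeStepA st (PySem.List.pyGetD (prev :: t) j []) (PySem.List.pyGetD t j []))
            ([], 0) := by
      have hn : (((prev :: t).length : Int)) = (t.length : Int) + 1 := by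
        simp [List.length_cons]
      rw [hn, foldl_pyRange_shift]
      apply PySem.List.foldl_congr_mem
      intro st j hj
      have hj0 : 0 ≤ j := (PySem.List.mem_pyRange_one.mp hj).1
      simp only [strokeStepA]
      rw [show j + 1 - 1 = j by ring, pyGetD_cons_succ' _ _ _ _ hj0]
    rw [hstep, adj_aux strokeStepA t prev ([], 0)]
    rfl

theorem build_eq : ∀ (ev : List (Int × (List Int × List Int))) (rs fs : List (Int × Int)),
    ev.foldl (fun (st : List (Int × Int) × List (Int × Int)) e =>
        if 0 < PySem.List.pyGetD e.2.2 3 0 ∧ PySem.List.pyGetD e.2.1 3 0 = 0 then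
          (st.1 ++ [(e.1, PySem.List.pyGetD e.2.2 4 0)], st.2)
        else if PySem.List.pyGetD e.2.2 3 0 = 0 ∧ 0 < PySem.List.pyGetD e.2.1 3 0 then
          (st.1, st.2 ++ [(e.1, PySem.List.pyGetD e.2.2 4 0)])
        else st) (rs, fs)
    = (rs ++ risesOf ev, fs ++ fallsOf ev) := by
  intro ev
  induction ev with
  | nil => intro rs fs; simp [risesOf, fallsOf]
  | cons e l ih =>
    intro rs fs
    simp only [List.foldl_cons]
    by_cases h1 : 0 < PySem.List.pyGetD e.2.2 3 0 ∧ PySem.List.pyGetD e.2.1 3 0 = 0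
    · rw [if_pos h1, ih, risesOf, if_pos h1, fallsOf, if_pos h1]
      simp
    · by_cases h2 : PySem.List.pyGetD e.2.2 3 0 = 0 ∧ 0 < PySem.List.pyGetD e.2.1 3 0
      · rw [if_neg h1, if_pos h2, ih, risesOf, if_neg h1, fallsOf, if_neg h1, if_pos h2]
        simp
      · rw [if_neg h1, if_neg h2, ih, risesOf, if_neg h1, fallsOf, if_neg h1, if_neg h2]

theorem pairfold_eq : ∀ (fs : List (Int × Int)) (rs : List (Int × Int)) (start : Int) (durs : List Int),
    (fs.foldl (fun (st : List (Int × Int) × Int × List Int) f =>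
        let c := strokeConsume st.1 st.2.1 f.1
        (c.1, c.2, st.2.2 ++ [f.2 - c.2])) (rs, start, durs)).2.2
    = pairRec rs start fs durs := by
  intro fs
  induction fs with
  | nil => intro rs start durs; rfl
  | cons f fs ih =>
    intro rs start durs
    simp only [List.foldl_cons]
    rw [pairRec]
    exact ih _ _ _

theorem foldA_eq_mach : ∀ (l : List (List Int × List Int)) (durs : List Int) (start : Int),
    (l.foldl (fun st pc => strokeStepA st pc.1 pc.2) (durs, start)).1 = machRec l durs start := by
  intro l
  induction l with
  | nil => intro durs start; rfl
  | cons pc l ih =>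
    intro durs start
    simp only [List.foldl_cons]
    by_cases h1 : 0 < PySem.List.pyGetD pc.2 3 0 ∧ PySem.List.pyGetD pc.1 3 0 = 0
    · have h2 : ¬(PySem.List.pyGetD pc.2 3 0 = 0 ∧ 0 < PySem.List.pyGetD pc.1 3 0) := by
        rintro ⟨h2a, _⟩; omega
      rw [show strokeStepA (durs, start) pc.1 pc.2 = (durs, PySem.List.pyGetD pc.2 4 0) from by
        simp [strokeStepA, h1]]
      rw [machRec, if_pos h1]
      exact ih durs _
    · by_cases h2 : PySem.List.pyGetD pc.2 3 0 = 0 ∧ 0 < PySem.List.pyGetD pc.1 3 0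
      · rw [show strokeStepA (durs, start) pc.1 pc.2
              = (durs ++ [PySem.List.pyGetD pc.2 4 0 - start], start) from by
          simp [strokeStepA, h2]]
        rw [machRec, if_neg h1, if_pos h2]
        exact ih _ start
      · rw [show strokeStepA (durs, start) pc.1 pc.2 = (durs, start) from by
          simp [strokeStepA, h1, h2]]
        rw [machRec, if_neg h1, if_neg h2]
        exact ih durs start

theorem mem_risesOf_fst : ∀ (ev : List (Int × (List Int × List Int))) (r : Int × Int),
    r ∈ risesOf ev → ∃ e ∈ ev, r.1 = e.1 := by
  intro ev
  induction ev with
  | nil => intro r h; simp [risesOf] at h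
  | cons e l ih =>
    intro r h
    rw [risesOf] at h
    split at h
    · rcases List.mem_cons.mp h with h | h
      · exact ⟨e, List.mem_cons_self, by rw [h]⟩
      · obtain ⟨e', he', hr⟩ := ih r h; exact ⟨e', List.mem_cons_of_mem _ he', hr⟩
    · obtain ⟨e', he', hr⟩ := ih r h; exact ⟨e', List.mem_cons_of_mem _ he', hr⟩

theorem mem_fallsOf_fst : ∀ (ev : List (Int × (List Int × List Int))) (r : Int × Int),
    r ∈ fallsOf ev → ∃ e ∈ ev, r.1 = e.1 := by
  intro ev
  induction ev with
  | nil => intro r h; simp [fallsOf] at h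
  | cons e l ih =>
    intro r h
    rw [fallsOf] at h
    split at h
    · obtain ⟨e', he', hr⟩ := ih r h; exact ⟨e', List.mem_cons_of_mem _ he', hr⟩
    · split at h
      · rcases List.mem_cons.mp h with h | h
        · exact ⟨e, List.mem_cons_self, by rw [h]⟩
        · obtain ⟨e', he', hr⟩ := ih r h; exact ⟨e', List.mem_cons_of_mem _ he', hr⟩
      · obtain ⟨e', he', hr⟩ := ih r h; exact ⟨e', List.mem_cons_of_mem _ he', hr⟩

theorem consume_stop (rs : List (Int × Int)) (start fi : Int)
    (h : ∀ r ∈ rs, ¬ r.1 < fi) : strokeConsume rs start fi = (rs, start) := by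
  cases rs with
  | nil => rfl
  | cons r rest => rw [strokeConsume, if_neg (h r List.mem_cons_self)]

theorem pair_eq_mach : ∀ (ev : List (Int × (List Int × List Int))),
    ev.Pairwise (fun a b => a.1 < b.1) → ∀ (start : Int) (durs : List Int),
    pairRec (risesOf ev) start (fallsOf ev) durs = machRec (ev.map (·.2)) durs start := by
  intro ev
  induction ev with
  | nil => intro _ start durs; rfl
  | cons e l ih =>
    intro hp start durs
    obtain ⟨hlt, hl⟩ := List.pairwise_cons.mp hp
    simp only [List.map_cons]
    by_cases h1 : 0 < PySem.List.pyGetD e.2.2 3 0 ∧ PySem.List.pyGetD e.2.1 3 0 = 0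
    · rw [risesOf, if_pos h1, fallsOf, if_pos h1, machRec, if_pos h1]
      rw [← ih hl (PySem.List.pyGetD e.2.2 4 0) durs]
      cases hfl : fallsOf l with
      | nil => rfl
      | cons f fs =>
        have hif : e.1 < f.1 := by
          obtain ⟨e', he', hr⟩ := mem_fallsOf_fst l f (hfl ▸ List.mem_cons_self)
          rw [hr]; exact hlt e' he'
        simp only [pairRec]
        rw [show strokeConsume ((e.1, PySem.List.pyGetD e.2.2 4 0) :: risesOf l) start f.1
              = strokeConsume (risesOf l) (PySem.List.pyGetD e.2.2 4 0) f.1 from by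
          rw [strokeConsume, if_pos hif]]
    · by_cases h2 : PySem.List.pyGetD e.2.2 3 0 = 0 ∧ 0 < PySem.List.pyGetD e.2.1 3 0
      · rw [risesOf, if_neg h1, fallsOf, if_neg h1, if_pos h2, machRec, if_neg h1, if_pos h2]
        simp only [pairRec]
        rw [consume_stop _ start e.1 (by
          intro r hr
          obtain ⟨e', he', hfst⟩ := mem_risesOf_fst l r hr
          rw [hfst]; exact not_lt.mpr (le_of_lt (hlt e' he')))]
        exact ih hl start _
      · rw [risesOf, if_neg h1, fallsOf, if_neg h1, if_neg h2, machRec, if_neg h1, if_neg h2]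
        exact ih hl start durs

theorem ports_eq (points : List (List Int)) : stroke_dur points = stroke_dur_alt points := by
  rw [A_eq_pairs, foldA_eq_mach]
  unfold stroke_dur_alt
  rw [PySem.List.slice_from_one]
  rw [build_eq]
  simp only [List.nil_append]
  rw [pairfold_eq]
  rw [pair_eq_mach _ (PySem.List.pairwise_lt_enumerate _ _) 0 []]
  rw [PySem.List.map_snd_enumerate]

-- ===== VERDICT (by name: the statement is the Claim_ definition above) =====
theorem stroke_dur_spec : Claim_equal_stroke_dur := by
  intro points _ _
  unfold Spec_stroke_dur
  exact ports_eq points
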